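-- pv_equiv track=rewrite | github.com/orifjohn/binary_search | listminreplacement.py | solve
-- ===== SOURCE A (Python) =====
-- def solve(nums):
--     if not nums:
--         return []
--     minSoFar, prev = nums[0], nums[0]
--     for i in range(1, len(nums)):
--         minSoFar = min(minSoFar, prev)
--         prev = nums[i]
--         nums[i] = minSoFar
--
--     nums[0] = 0
--     return nums
-- ===== SOURCE B (Python) =====
-- def _prefmins(xs):
--     # divide and conquer: prefix-minima of xs (xs nonempty)
--     if len(xs) == 1:
--         return xs[:]
--     h = len(xs) // 2
--     left = _prefmins(xs[:h])
--     m = left[-1]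
--     return left + [min(m, v) for v in _prefmins(xs[h:])]
--
-- def solve(nums):
--     if not nums:
--         return []
--     pm = _prefmins(nums)
--     nums[:] = [0] + pm[:-1]
--     return nums
-- ===== Notes on version B (the rewrite author's own statement) =====
-- stated objective: alternative
-- what changed: B computes the prefix-minimum table by divide and conquer (split in half, recurse on each half, offset the right half's table by the left half's total minimum) and installs a zero followed by all but the table's last entry via one whole-list slice assignment, instead of A's single in-place left-to-right pass threading the rolling minSoFar/prev accumulators.
import Mathlib
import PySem

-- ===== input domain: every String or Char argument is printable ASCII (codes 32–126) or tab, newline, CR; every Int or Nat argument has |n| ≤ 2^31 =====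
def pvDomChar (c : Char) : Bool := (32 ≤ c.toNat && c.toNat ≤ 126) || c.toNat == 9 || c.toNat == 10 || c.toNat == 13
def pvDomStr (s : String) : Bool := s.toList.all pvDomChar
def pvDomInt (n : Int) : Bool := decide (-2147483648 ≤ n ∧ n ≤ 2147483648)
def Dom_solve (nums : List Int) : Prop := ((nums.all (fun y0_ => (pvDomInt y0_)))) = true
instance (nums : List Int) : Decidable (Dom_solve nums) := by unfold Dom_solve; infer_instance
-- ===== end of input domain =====

-- B builds the prefix-minimum table by divide and conquer (recurse on the two halves, offset the right
-- half's table by the left half's total minimum) and installs a zero followed by all but the table's last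
-- entry via one whole-list slice assignment, instead of A's in-place left-to-right pass with rolling minSoFar/prev (objective: alternative).
-- Both Pythons mutate the argument list identically; the theorem is about the return value.

-- ===== PORT A =====
def solve (nums : List Int) : List Int :=
  if nums = [] then []
  else
    let n0 := PySem.List.pyGetD nums 0 0
    let st := (PySem.List.pyRange 1 nums.length 1).foldl
      (fun (s : Int × Int × List Int) i =>
        let m := min s.1 s.2.1
        let p := PySem.List.pyGetD s.2.2 i 0
        (m, p, PySem.List.pySetD s.2.2 i m)) (n0, n0, nums)
    PySem.List.pySetD st.2.2 0 0

-- ===== PORT B =====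
-- termination facts for prefmins' two half-slices (cited by decreasing_by)
lemma len_half_take (xs : List Int) (h2 : 2 ≤ xs.length) :
    (PySem.List.slice xs none (some (PySem.Int.floordiv (xs.length : Int) 2))).length < xs.length := by
  have hfd : PySem.Int.floordiv (xs.length : Int) 2 = ((xs.length / 2 : Nat) : Int) := by
    exact_mod_cast PySem.Int.floordiv_natCast xs.length 2
  rw [hfd, PySem.List.slice_to_natCast, List.length_take]
  omega

lemma len_half_drop (xs : List Int) (h2 : 2 ≤ xs.length) :
    (PySem.List.slice xs (some (PySem.Int.floordiv (xs.length : Int) 2)) none).length < xs.length := by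
  have hfd : PySem.Int.floordiv (xs.length : Int) 2 = ((xs.length / 2 : Nat) : Int) := by
    exact_mod_cast PySem.Int.floordiv_natCast xs.length 2
  rw [hfd, PySem.List.slice_from_natCast, List.length_drop]
  omega

-- _prefmins: Python's `if len(xs) == 1: return xs[:]`; the `≤ 1` base also returns [] on [] purely for
-- totality (Python's solve never calls _prefmins on an empty list)
def prefmins (xs : List Int) : List Int :=
  if _hle : xs.length ≤ 1 then xs
  else
    let h := PySem.Int.floordiv (xs.length : Int) 2
    let left := prefmins (PySem.List.slice xs none (some h))
    let m := PySem.List.pyGetD left (-1) 0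
    left ++ (prefmins (PySem.List.slice xs (some h) none)).map (fun v => min m v)
termination_by xs.length
decreasing_by
· exact len_half_take xs (by omega)
· exact len_half_drop xs (by omega)

def solve_alt (nums : List Int) : List Int :=
  if nums = [] then []
  else
    let pm := prefmins nums
    0 :: PySem.List.slice pm none (some (-1))

-- ===== PRECONDITION & SPEC =====
def Spec_solve (nums : List Int) (out : List Int) : Prop := out = solve_alt nums
instance (nums : List Int) (out : List Int) : Decidable (Spec_solve nums out) := by unfold Spec_solve; infer_instance

-- ===== CLAIM (what is proved, stated in full; the proofs are below) =====
def Claim_equal_solve : Prop := ∀ (nums : List Int), Dom_solve nums → Spec_solve nums (solve nums)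

-- ===== LEMMAS AND PROOFS =====

-- the rolling prefix-minimum sequence (proof-only characterisation shared by both sides)
def scanMin (m : Int) : List Int → List Int
  | [] => []
  | x :: xs => min m x :: scanMin (min m x) xs

-- prefix-minimum table of a list (what both programs compute, in different ways)
def pms : List Int → List Int
  | [] => []
  | x :: xs => x :: scanMin x xs

-- the sequence of values A's loop writes into positions 1..n-1
def writeMins (m p : Int) : List Int → List Int
  | [] => []
  | x :: xs => min m p :: writeMins (min m p) x xs

lemma solve_loop_inv (rest : List Int) : ∀ (pre : List Int) (m p : Int),
    ((PySem.List.pyRange pre.length (pre.length + rest.length) 1).foldl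
      (fun (s : Int × Int × List Int) i =>
        let m := min s.1 s.2.1
        let p := PySem.List.pyGetD s.2.2 i 0
        (m, p, PySem.List.pySetD s.2.2 i m)) (m, p, pre ++ rest)).2.2
      = pre ++ writeMins m p rest := by
  induction rest with
  | nil =>
      intro pre m p
      simp [PySem.List.pyRange_one_eq_nil, writeMins]
  | cons x xs ih =>
      intro pre m p
      have hlt : (pre.length : Int) < pre.length + (x :: xs).length := by
        simp
      rw [PySem.List.pyRange_one_cons hlt, List.foldl_cons]
      have hget : PySem.List.pyGetD (pre ++ x :: xs) (pre.length : Int) 0 = x := by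
        rw [PySem.List.pyGetD_natCast]
        simp [List.getD]
      have hset : PySem.List.pySetD (pre ++ x :: xs) (pre.length : Int) (min m p)
          = (pre ++ [min m p]) ++ xs := by
        rw [PySem.List.pySetD_natCast]
        simp
      simp only [hget, hset]
      have hlen : (pre.length : Int) + 1 = ((pre ++ [min m p]).length : Int) := by simp
      have hlen2 : (pre.length : Int) + (x :: xs).length
          = ((pre ++ [min m p]).length : Int) + xs.length := by simp; omega
      rw [hlen, hlen2, ih (pre ++ [min m p]) (min m p) x]
      simp [writeMins]

lemma writeMins_eq_scan (xs : List Int) : ∀ (m p : Int),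
    writeMins m p xs = (min m p :: scanMin (min m p) xs).dropLast := by
  induction xs with
  | nil => intro m p; simp [writeMins, scanMin]
  | cons y ys ih =>
      intro m p
      simp only [writeMins, scanMin, List.dropLast_cons₂]
      rw [ih (min m p) y]

lemma scanMin_map_min (t : List Int) : ∀ (m a : Int),
    (scanMin a t).map (fun v => min m v) = scanMin (min m a) t := by
  induction t with
  | nil => intro m a; simp [scanMin]
  | cons y ys ih =>
      intro m a
      simp only [scanMin, List.map_cons, ih]
      have h1 : min m (min a y) = min (min m a) y := by
        rw [min_assoc]
      rw [h1]

lemma pms_map_min (l : List Int) (m : Int) :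
    (pms l).map (fun v => min m v) = scanMin m l := by
  cases l with
  | nil => simp [pms, scanMin]
  | cons x t =>
      simp only [pms, scanMin, List.map_cons, scanMin_map_min]

lemma scanMin_append (as : List Int) : ∀ (m : Int) (bs : List Int),
    scanMin m (as ++ bs) = scanMin m as ++ (pms bs).map (fun v => min (as.foldl min m) v) := by
  induction as with
  | nil =>
      intro m bs
      simp [scanMin, pms_map_min]
  | cons x t ih =>
      intro m bs
      simp only [List.cons_append, scanMin, List.foldl_cons, ih]

lemma pms_append (a : Int) (as bs : List Int) :
    pms ((a :: as) ++ bs) = pms (a :: as) ++ (pms bs).map (fun v => min (as.foldl min a) v) := by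
  simp only [List.cons_append, pms, scanMin_append]

lemma getLast_pms (t : List Int) : ∀ (a : Int) (h : pms (a :: t) ≠ []),
    (pms (a :: t)).getLast h = t.foldl min a := by
  induction t with
  | nil => intro a h; simp [pms, scanMin]
  | cons y ys ih =>
      intro a h
      have h2 : pms (min a y :: ys) ≠ [] := by simp [pms]
      have : (pms (a :: y :: ys)).getLast h = (pms (min a y :: ys)).getLast h2 := by
        simp only [pms, scanMin]
        exact List.getLast_cons _
      rw [this, ih (min a y) h2]
      simp [List.foldl_cons]

lemma pms_ne_nil (a : Int) (t : List Int) : pms (a :: t) ≠ [] := by simp [pms]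

lemma prefmins_eq_pms (n : Nat) : ∀ (xs : List Int), xs.length ≤ n → xs ≠ [] →
    prefmins xs = pms xs := by
  induction n with
  | zero => intro xs hn hne; cases xs <;> simp_all
  | succ k ih =>
      intro xs hn hne
      by_cases hle : xs.length ≤ 1
      · obtain ⟨a, t, rfl⟩ := List.exists_cons_of_ne_nil hne
        have : t = [] := by cases t <;> simp_all
        subst this
        rw [prefmins]
        simp [pms, scanMin]
      · rw [prefmins]
        simp only [hle, dite_false]
        have h2 : 2 ≤ xs.length := by omega
        have hfd : PySem.Int.floordiv (xs.length : Int) 2 = ((xs.length / 2 : Nat) : Int) := by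
          exact_mod_cast PySem.Int.floordiv_natCast xs.length 2
        have htake : PySem.List.slice xs none (some (PySem.Int.floordiv (xs.length : Int) 2))
            = xs.take (xs.length / 2) := by
          rw [hfd, PySem.List.slice_to_natCast]
        have hdrop : PySem.List.slice xs (some (PySem.Int.floordiv (xs.length : Int) 2)) none
            = xs.drop (xs.length / 2) := by
          rw [hfd, PySem.List.slice_from_natCast]
        have htne : xs.take (xs.length / 2) ≠ [] := by
          have hl : 0 < (xs.take (xs.length / 2)).length := by
            rw [List.length_take]
            exact lt_min (by omega) (by omega)
          exact List.ne_nil_of_length_pos hl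
        have hdne : xs.drop (xs.length / 2) ≠ [] := by
          intro h
          have := congrArg List.length h
          simp [List.length_drop] at this
          omega
        rw [htake, hdrop,
          ih _ (by rw [List.length_take]; exact le_trans (Nat.min_le_left _ _) (by omega)) htne,
          ih _ (by rw [List.length_drop]; omega) hdne]
        obtain ⟨a, t, hat⟩ := List.exists_cons_of_ne_nil htne
        rw [hat]
        have hlast : PySem.List.pyGetD (pms (a :: t)) (-1) 0 = t.foldl min a := by
          rw [PySem.List.pyGetD_neg_one (pms (a :: t)) 0 (pms_ne_nil a t), getLast_pms]
        rw [hlast, ← pms_append a t (xs.drop (xs.length / 2)), ← hat,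
          List.take_append_drop]

-- ===== VERDICT (by name: the statement is the Claim_ definition above) =====
theorem solve_spec : Claim_equal_solve := by
  unfold Claim_equal_solve
  intro nums _
  unfold Spec_solve solve solve_alt
  cases nums with
  | nil => simp
  | cons n0 rest =>
      simp only [reduceCtorEq, if_false]
      have h0 : PySem.List.pyGetD (n0 :: rest) 0 0 = n0 := by
        simp [PySem.List.pyGetD_ofNat']
      have key := solve_loop_inv rest [n0] n0 n0
      norm_num at key
      rw [h0]
      have hlen : ((n0 :: rest).length : Int) = 1 + (rest.length : Int) := by
        simp; omega
      rw [hlen, key]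
      rw [show (0 : Int) = ((0 : Nat) : Int) from rfl, PySem.List.pySetD_natCast]
      have hp : prefmins (n0 :: rest) = pms (n0 :: rest) :=
        prefmins_eq_pms (n0 :: rest).length _ (le_refl _) (by simp)
      rw [hp, PySem.List.slice_to_neg_one]
      rw [writeMins_eq_scan]
      simp [pms]
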